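-- pv_equiv track=rewrite | github.com/Mahdi-Massahi/gp | GP.py | indexes_of_in
-- ===== SOURCE A (Python) =====
-- def indexes_of_in(item, space: list):
--     start = 0
--     length = len(space)
--     positions = []
--     while start <= length:
--         try:
--             index = space.index(item, start)
--             if type(space[index]) == type(item):
--                 positions.append(index)
--             start = index + 1
--
--         except ValueError:
--             break
--
--     return positions if len(positions) > 0 else None
-- ===== SOURCE B (Python) =====
-- def indexes_of_in(item, space: list):
--     positions = []
--     for i, x in enumerate(space):
--         if item == x and type(x) == type(item):
--             positions.append(i)
--     return positions if positions else None
-- ===== Notes on version B (the rewrite author's own statement) =====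
-- stated objective: simpler
-- what changed: Replaces the exception-driven while loop of repeated space.index(item, start) calls with a single flat for-loop over enumerate(space) that collects matching indices directly.
import Mathlib
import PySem

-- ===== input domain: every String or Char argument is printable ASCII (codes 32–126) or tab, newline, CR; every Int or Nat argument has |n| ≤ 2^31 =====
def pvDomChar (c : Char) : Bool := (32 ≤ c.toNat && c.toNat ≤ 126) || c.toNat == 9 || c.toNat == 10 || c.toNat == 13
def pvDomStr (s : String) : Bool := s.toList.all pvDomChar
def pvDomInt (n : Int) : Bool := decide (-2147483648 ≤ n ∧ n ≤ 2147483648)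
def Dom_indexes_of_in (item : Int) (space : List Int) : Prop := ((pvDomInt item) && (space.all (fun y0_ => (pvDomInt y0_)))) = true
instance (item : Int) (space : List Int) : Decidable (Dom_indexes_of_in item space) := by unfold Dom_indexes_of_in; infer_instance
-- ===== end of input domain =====

-- B replaces A's exception-driven repeated `space.index(item, start)` while-loop with a
-- single flat enumerate pass collecting matching indices (objective: simpler).

-- ===== PORT A =====
-- space.index(item, start): first index ≥ start holding item, none = ValueError
def pyIndexFrom (item : Int) (space : List Int) (start : Nat) : Option Nat :=
  (PySem.List.index? (space.drop start) item).map (· + start)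

-- the while-loop of A; `type(space[index]) == type(item)` is always True for int vs int
def loopA (item : Int) (space : List Int) (start : Nat) (positions : List Int) : List Int :=
  if _h : start ≤ space.length then
    match hf_ : pyIndexFrom item space start with
    | some index => loopA item space (index + 1) (positions ++ [Int.ofNat index])
    | none => positions
  else positions
termination_by space.length + 1 - start
decreasing_by
  obtain ⟨j, _, hj⟩ := Option.map_eq_some_iff.mp hf_
  omega

def indexes_of_in (item : Int) (space : List Int) : Option (List Int) :=
  let positions := loopA item space 0 []
  if positions.length > 0 then some positions else none

-- ===== PORT B =====
def indexes_of_in_alt (item : Int) (space : List Int) : Option (List Int) :=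
  let positions := (PySem.List.enumerate space).foldl
    (fun acc p => if item = p.2 then acc ++ [p.1] else acc) []
  if positions = [] then none else some positions

-- ===== PRECONDITION & SPEC =====
def Spec_indexes_of_in (item : Int) (space : List Int) (out : Option (List Int)) : Prop := out = indexes_of_in_alt item space
instance (item : Int) (space : List Int) (out : Option (List Int)) : Decidable (Spec_indexes_of_in item space out) := by unfold Spec_indexes_of_in; infer_instance

-- ===== CLAIM (what is proved, stated in full; the proofs are below) =====
def Claim_equal_indexes_of_in : Prop := ∀ (item : Int) (space : List Int), Dom_indexes_of_in item space → Spec_indexes_of_in item space (indexes_of_in item space)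

-- ===== LEMMAS AND PROOFS =====

-- indices i, i+1, … of the elements of l equal to item
def scanIdx (item : Int) : List Int → Nat → List Int
  | [], _ => []
  | x :: xs, i => if item = x then Int.ofNat i :: scanIdx item xs (i + 1) else scanIdx item xs (i + 1)

theorem scanIdx_of_not_mem (item : Int) (l : List Int) (i : Nat) (h : item ∉ l) :
    scanIdx item l i = [] := by
  induction l generalizing i with
  | nil => rfl
  | cons x xs ih =>
    simp only [List.mem_cons, not_or] at h
    simp [scanIdx, h.1, ih _ h.2]

theorem scanIdx_split (item : Int) (pre suf : List Int) (i : Nat) (h : item ∉ pre) :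
    scanIdx item (pre ++ item :: suf) i
      = Int.ofNat (i + pre.length) :: scanIdx item suf (i + pre.length + 1) := by
  induction pre generalizing i with
  | nil => simp [scanIdx]
  | cons x xs ih =>
    simp only [List.mem_cons, not_or] at h
    simp only [List.cons_append, scanIdx, if_neg h.1, ih _ h.2, List.length_cons]
    have hx : i + (xs.length + 1) = i + 1 + xs.length := by omega
    rw [hx]

theorem loopA_eq (item : Int) (space : List Int) (start : Nat) (pos : List Int) :
    loopA item space start pos = pos ++ scanIdx item (space.drop start) start := by
  induction hn : space.length + 1 - start using Nat.strong_induction_on generalizing start pos with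
  | _ n ih =>
  rw [loopA]
  by_cases h : start ≤ space.length
  · rw [dif_pos h]
    cases hf : pyIndexFrom item space start with
    | none =>
      simp only [pyIndexFrom, Option.map_eq_none_iff, PySem.List.index?_eq_none_iff] at hf
      simp [scanIdx_of_not_mem item _ _ hf]
    | some index =>
      obtain ⟨j, hj, hji⟩ := Option.map_eq_some_iff.mp hf
      obtain ⟨pre, suf, hsplit, hlen, hnm⟩ := (PySem.List.index?_eq_some_iff _ _ _).mp hj
      have hdrop : space.drop (index + 1) = suf := by
        have h1 : space.drop (index + 1) = (space.drop start).drop (j + 1) := by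
          rw [List.drop_drop]; congr 1; omega
        rw [h1, hsplit]
        have h3 : j + 1 = pre.length + 1 := by omega
        rw [h3, List.drop_append]
        simp
      show loopA item space (index + 1) (pos ++ [Int.ofNat index])
        = pos ++ scanIdx item (space.drop start) start
      rw [ih (space.length + 1 - (index + 1)) (by omega) (index + 1) _ rfl, hdrop,
        hsplit, scanIdx_split item pre suf start hnm]
      simp only [List.append_assoc, List.singleton_append]
      congr 3 <;> omega
  · have hd : space.drop start = [] := List.drop_eq_nil_of_le (by omega)
    rw [dif_neg h, hd]
    simp [scanIdx]

theorem foldl_enumerate_eq (item : Int) (l : List Int) (i : Nat) (acc : List Int) :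
    (PySem.List.enumerate l (Int.ofNat i)).foldl
      (fun acc p => if item = p.2 then acc ++ [p.1] else acc) acc
      = acc ++ scanIdx item l i := by
  induction l generalizing i acc with
  | nil => simp [PySem.List.enumerate_nil, scanIdx]
  | cons x xs ih =>
    rw [PySem.List.enumerate_cons]
    have hcast : (Int.ofNat i) + 1 = Int.ofNat (i + 1) := rfl
    simp only [List.foldl_cons, hcast, ih]
    by_cases h : item = x
    · simp [scanIdx, h]
    · simp [scanIdx, h]

-- ===== VERDICT (by name: the statement is the Claim_ definition above) =====
theorem indexes_of_in_spec : Claim_equal_indexes_of_in := by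
  intro item space _
  unfold Spec_indexes_of_in indexes_of_in indexes_of_in_alt
  have hB : (PySem.List.enumerate space).foldl
      (fun acc p => if item = p.2 then acc ++ [p.1] else acc) [] = scanIdx item space 0 := by
    simpa using foldl_enumerate_eq item space 0 []
  simp only [hB, loopA_eq, List.drop_zero, List.nil_append]
  cases scanIdx item space 0 <;> simp
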